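-- pv_equiv track=rewrite | github.com/hesh64/Algos | sysdesign/facebook/flag_words.py | flag_word
-- ===== SOURCE A (Python) =====
-- def len_repeated(s, i):
--     temp = i
--     while temp < len(s) and s[i] == s[temp]:
--         temp += 1
--
--     return temp - i
--
-- def flag_word(s, w):
--     if not s or not w:
--         return False
--     i, j = 0, 0
--     while i < len(s) and j < len(w):
--         if s[i] == w[j]:
--             len1 = len_repeated(s, i)
--             len2 = len_repeated(w, j)
--
--             if (len1 < 3 and len1 != len2) or (3 <= len1 < len2):
--                 return False
--
--             i += len1
--             j += len2
--         else:
--             return False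
--
--     return i == len(s) and j == len(w)
-- ===== SOURCE B (Python) =====
-- def _rle(x):
--     runs = []
--     for c in x:
--         if runs and runs[-1][0] == c:
--             runs[-1][1] += 1
--         else:
--             runs.append([c, 1])
--     return runs
--
-- def _runs_match(rs, rw):
--     if len(rs) != len(rw):
--         return False
--     for (c1, l1), (c2, l2) in zip(rs, rw):
--         if c1 != c2 or (l1 < 3 and l1 != l2) or (3 <= l1 < l2):
--             return False
--     return True
--
-- def flag_word(s, w):
--     if not s or not w:
--         return False
--     return _runs_match(_rle(s), _rle(w))
-- ===== Notes on version B (the rewrite author's own statement) =====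
-- stated objective: simpler
-- what changed: Replaced A's interleaved two-pointer scan with repeated in-place run-length probing by a two-phase build-then-compare: each string is run-length encoded once with a single fold, then the two run lists are compared pairwise.
import Mathlib
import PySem

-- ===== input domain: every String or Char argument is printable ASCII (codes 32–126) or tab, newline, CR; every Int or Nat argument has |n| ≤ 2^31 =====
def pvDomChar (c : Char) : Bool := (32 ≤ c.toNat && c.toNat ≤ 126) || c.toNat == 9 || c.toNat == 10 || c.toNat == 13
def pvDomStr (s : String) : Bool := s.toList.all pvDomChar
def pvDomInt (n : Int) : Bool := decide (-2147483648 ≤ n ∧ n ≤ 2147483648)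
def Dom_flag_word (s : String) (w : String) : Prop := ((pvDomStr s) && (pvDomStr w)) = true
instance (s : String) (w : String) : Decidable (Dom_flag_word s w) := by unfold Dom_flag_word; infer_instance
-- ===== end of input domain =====

-- B re-implements A by a two-phase build-then-compare over run-length encodings (objective: simpler); return values proved equal on all inputs.

-- ===== PORT A =====
-- while loop of len_repeated
def pvLenRepLoop (s : List Char) (i temp : Nat) : Nat :=
  if h : temp < s.length ∧ s.getD i ' ' = s.getD temp ' ' then
    pvLenRepLoop s i (temp + 1)
  else temp
termination_by s.length - temp
decreasing_by omega

def pvLenRepeated (s : List Char) (i : Nat) : Nat :=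
  pvLenRepLoop s i i - i

-- the loop result never moves below its start (needed for termination of the main loop)
theorem pvLenRepLoop_ge (s : List Char) (i temp : Nat) : temp ≤ pvLenRepLoop s i temp := by
  fun_induction pvLenRepLoop s i temp with
  | case1 _ _ ih => omega
  | case2 => omega

theorem pvLenRepeated_pos (s : List Char) (i : Nat) (h : i < s.length) :
    1 ≤ pvLenRepeated s i := by
  unfold pvLenRepeated
  rw [pvLenRepLoop, dif_pos ⟨h, rfl⟩]
  have := pvLenRepLoop_ge s i (i + 1)
  omega

-- main two-pointer while loop of flag_word
def pvFlagLoop (s w : List Char) (i j : Nat) : Bool :=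
  if h : i < s.length ∧ j < w.length then
    if s.getD i ' ' = w.getD j ' ' then
      let len1 := pvLenRepeated s i
      let len2 := pvLenRepeated w j
      if (len1 < 3 ∧ len1 ≠ len2) ∨ (3 ≤ len1 ∧ len1 < len2) then false
      else pvFlagLoop s w (i + len1) (j + len2)
    else false
  else i == s.length && j == w.length
termination_by s.length - i
decreasing_by
  have := pvLenRepeated_pos s i h.1
  omega

def flag_word (s : String) (w : String) : Bool :=
  if s.toList.isEmpty || w.toList.isEmpty then false
  else pvFlagLoop s.toList w.toList 0 0

-- ===== PORT B =====
-- run-length encoding, the fold of Source B's _rle (accumulator kept reversed: runs[-1] is the head)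
def pvRleStep (acc : List (Char × Nat)) (c : Char) : List (Char × Nat) :=
  match acc with
  | (d, n) :: t => if d = c then (d, n + 1) :: t else (c, 1) :: (d, n) :: t
  | [] => [(c, 1)]

def pvRLE (x : List Char) : List (Char × Nat) :=
  (x.foldl pvRleStep []).reverse

-- one aligned run pair passes (the negated failing condition of Source B's loop body)
def pvRunOk (p : (Char × Nat) × (Char × Nat)) : Bool :=
  (p.1.1 == p.2.1) &&
    !((decide (p.1.2 < 3) && (p.1.2 != p.2.2)) || (decide (3 ≤ p.1.2) && decide (p.1.2 < p.2.2)))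

-- Source B's _runs_match: length check, then the zip loop
def pvRunsMatch (rs rw : List (Char × Nat)) : Bool :=
  if rs.length != rw.length then false else (rs.zip rw).all pvRunOk

def flag_word_alt (s : String) (w : String) : Bool :=
  if s.toList.isEmpty || w.toList.isEmpty then false
  else pvRunsMatch (pvRLE s.toList) (pvRLE w.toList)

-- ===== PRECONDITION & SPEC =====
def Spec_flag_word (s : String) (w : String) (out : Bool) : Prop := out = flag_word_alt s w
instance (s : String) (w : String) (out : Bool) : Decidable (Spec_flag_word s w out) := by unfold Spec_flag_word; infer_instance

-- ===== CLAIM (what is proved, stated in full; the proofs are below) =====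
def Claim_equal_flag_word : Prop := ∀ (s : String) (w : String), Dom_flag_word s w → Spec_flag_word s w (flag_word s w)

-- ===== LEMMAS AND PROOFS =====

-- front-recursive characterisation of the run-length encoding (proof helper)
def pvRleRec : List Char → List (Char × Nat)
  | [] => []
  | c :: rest =>
      (c, (rest.takeWhile (fun x => c == x)).length + 1) ::
        pvRleRec (rest.drop (rest.takeWhile (fun x => c == x)).length)
termination_by l => l.length
decreasing_by
  simp only [List.length_drop, List.length_cons]
  omega

-- the frozen tail of the fold accumulator
theorem pvRleStep_tail (l : List Char) : ∀ (x : Char × Nat) (t : List (Char × Nat)),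
    l.foldl pvRleStep (x :: t) = l.foldl pvRleStep [x] ++ t := by
  induction l with
  | nil => intro x t; simp
  | cons c l ih =>
      intro x t
      obtain ⟨d, n⟩ := x
      by_cases h : d = c
      · simp only [List.foldl_cons, pvRleStep, if_pos h]
        exact ih (d, n + 1) t
      · simp only [List.foldl_cons, pvRleStep, if_neg h]
        rw [ih (c, 1) ((d, n) :: t), ih (c, 1) [(d, n)]]
        simp

theorem pvRLE_fold_run (l : List Char) : ∀ (c : Char) (n : Nat),
    (l.foldl pvRleStep [(c, n)]).reverse =
      (c, n + (l.takeWhile (fun x => c == x)).length) ::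
        pvRleRec (l.drop (l.takeWhile (fun x => c == x)).length) := by
  induction l with
  | nil => intro c n; rw [pvRleRec.eq_def]; simp
  | cons x l ih =>
      intro c n
      by_cases h : c = x
      · subst h
        simp only [List.foldl_cons, pvRleStep, eq_self_iff_true, if_true]
        rw [List.takeWhile_cons, if_pos (by simp : (c == c) = true)]
        rw [ih c (n + 1)]
        simp only [List.length_cons, List.drop_succ_cons]
        congr 2
        omega
      · have hb : (c == x) = false := by simp [h]
        simp only [List.foldl_cons, pvRleStep, if_neg h]
        rw [List.takeWhile_cons, if_neg (by simp [hb] : ¬ (c == x) = true)]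
        rw [pvRleStep_tail l (x, 1) [(c, n)]]
        simp only [List.reverse_append, List.reverse_cons, List.reverse_nil, List.nil_append,
          List.length_nil, List.drop_zero, List.cons_append]
        rw [ih x 1]
        conv_rhs => rw [pvRleRec]
        simp [Nat.add_comm]

theorem pvRLE_eq_rec (l : List Char) : pvRLE l = pvRleRec l := by
  cases l with
  | nil => simp [pvRLE, pvRleRec]
  | cons c rest =>
      unfold pvRLE
      simp only [List.foldl_cons, pvRleStep]
      rw [pvRLE_fold_run rest c 1, pvRleRec]
      simp [Nat.add_comm]

theorem pvRleRec_nil : pvRleRec [] = [] := by simp [pvRleRec]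

theorem pvRleRec_nil_iff (l : List Char) : pvRleRec l = [] ↔ l = [] := by
  cases l with
  | nil => simp [pvRleRec]
  | cons c rest => simp [pvRleRec]

-- len_repeated computes the takeWhile run length at position i
theorem pvLenRepLoop_eq (s : List Char) (i temp : Nat) :
    pvLenRepLoop s i temp =
      temp + ((s.drop temp).takeWhile (fun x => s.getD i ' ' == x)).length := by
  fun_induction pvLenRepLoop s i temp with
  | case1 temp h ih =>
      rw [ih]
      rw [List.drop_eq_getElem_cons h.1]
      have hg : s.getD temp ' ' = s[temp] := List.getD_eq_getElem s ' ' h.1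
      have hpred : (s.getD i ' ' == s[temp]) = true := by
        rw [← hg]; exact beq_iff_eq.mpr h.2
      rw [List.takeWhile_cons, if_pos hpred, List.length_cons]
      omega
  | case2 temp h =>
      rcases Nat.lt_or_ge temp s.length with hlt | hge
      · have hne : s.getD i ' ' ≠ s.getD temp ' ' := fun he => h ⟨hlt, he⟩
        rw [List.drop_eq_getElem_cons hlt]
        have hg : s.getD temp ' ' = s[temp] := List.getD_eq_getElem s ' ' hlt
        have hpred : (s.getD i ' ' == s[temp]) = false := by
          rw [← hg]; exact beq_eq_false_iff_ne.mpr hne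
        rw [List.takeWhile_cons, if_neg (by rw [hpred]; simp)]
        simp
      · rw [List.drop_eq_nil_of_le hge]
        simp

theorem pvLenRepeated_eq (s : List Char) (i : Nat) :
    pvLenRepeated s i = ((s.drop i).takeWhile (fun x => s.getD i ' ' == x)).length := by
  unfold pvLenRepeated
  rw [pvLenRepLoop_eq]
  omega

theorem pvLenRepeated_le (s : List Char) (i : Nat) :
    pvLenRepeated s i ≤ s.length - i := by
  rw [pvLenRepeated_eq]
  have h1 := (List.takeWhile_prefix (l := s.drop i) (p := fun x => s.getD i ' ' == x)).length_le
  simp only [List.length_drop] at h1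
  exact h1

-- unfolding pvRleRec at an in-range position
theorem pvRleRec_drop (s : List Char) (i : Nat) (h : i < s.length) :
    pvRleRec (s.drop i) =
      (s.getD i ' ', pvLenRepeated s i) :: pvRleRec (s.drop (i + pvLenRepeated s i)) := by
  have hg : s.getD i ' ' = s[i] := List.getD_eq_getElem s ' ' h
  have hpred : (fun x => s[i] == x) = (fun x => s.getD i ' ' == x) := by
    funext x; rw [hg]
  have hlen : pvLenRepeated s i
      = ((s.drop (i + 1)).takeWhile (fun x => s[i] == x)).length + 1 := by
    rw [pvLenRepeated_eq, List.drop_eq_getElem_cons h, List.takeWhile_cons,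
      if_pos (by rw [hg]; simp : (s.getD i ' ' == s[i]) = true), List.length_cons, ← hpred]
  rw [List.drop_eq_getElem_cons h, pvRleRec, hg, hlen]
  rw [List.drop_drop]
  have he : i + 1 + (List.takeWhile (fun x => s[i] == x) (s.drop (i + 1))).length
      = i + ((List.takeWhile (fun x => s[i] == x) (s.drop (i + 1))).length + 1) := by omega
  rw [he]

-- pvRunsMatch on two conses reduces to head check then tails
theorem pvRunsMatch_cons (c1 : Char) (l1 : Nat) (c2 : Char) (l2 : Nat)
    (t1 t2 : List (Char × Nat)) :
    pvRunsMatch ((c1, l1) :: t1) ((c2, l2) :: t2) =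
      if pvRunOk ((c1, l1), (c2, l2)) then pvRunsMatch t1 t2 else false := by
  by_cases hlen : t1.length = t2.length
  · have h1 : ((((c1, l1) :: t1).length : Nat) != ((c2, l2) :: t2).length) = false := by
      simp [hlen]
    have h2 : ((t1.length : Nat) != t2.length) = false := by simp [hlen]
    simp only [pvRunsMatch, h1, h2, Bool.false_eq_true, if_false, List.zip_cons_cons,
      List.all_cons]
    cases hok : pvRunOk ((c1, l1), (c2, l2)) <;> simp [hok]
  · have h1 : ((((c1, l1) :: t1).length : Nat) != ((c2, l2) :: t2).length) = true := by
      simp [hlen]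
    have h2 : ((t1.length : Nat) != t2.length) = true := by simp [hlen]
    simp only [pvRunsMatch, h1, h2, if_true]
    cases hok : pvRunOk ((c1, l1), (c2, l2)) <;> simp

theorem pvRunsMatch_nil_left (t : List (Char × Nat)) :
    pvRunsMatch [] t = t.isEmpty := by
  cases t <;> simp [pvRunsMatch]

theorem pvRunsMatch_cons_nil (x : Char × Nat) (t : List (Char × Nat)) :
    pvRunsMatch (x :: t) [] = false := by
  simp [pvRunsMatch]

-- the main loop computes the run comparison of the two suffixes
theorem pvMain (s w : List Char) : ∀ (n i j : Nat), s.length - i ≤ n →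
    i ≤ s.length → j ≤ w.length →
    pvFlagLoop s w i j = pvRunsMatch (pvRleRec (s.drop i)) (pvRleRec (w.drop j)) := by
  intro n
  induction n with
  | zero =>
      intro i j hn hi hj
      have hie : i = s.length := by omega
      rw [pvFlagLoop]
      have : ¬ (i < s.length ∧ j < w.length) := by omega
      rw [dif_neg this]
      rw [hie, List.drop_length]
      simp only [pvRleRec]
      rw [pvRunsMatch_nil_left]
      by_cases hje : j = w.length
      · rw [hje, List.drop_length]
        simp [pvRleRec, hie]
      · have hjlt : j < w.length := by omega
        have hwd : w.drop j ≠ [] := by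
          simp [List.drop_eq_nil_iff]; omega
        have : pvRleRec (w.drop j) ≠ [] := by
          rw [Ne, pvRleRec_nil_iff]; exact hwd
        cases hr : pvRleRec (w.drop j) with
        | nil => exact absurd hr this
        | cons a t => simp [hie, hje]
  | succ n ih =>
      intro i j hn hi hj
      rw [pvFlagLoop]
      by_cases hb : i < s.length ∧ j < w.length
      · rw [dif_pos hb]
        rw [pvRleRec_drop s i hb.1, pvRleRec_drop w j hb.2]
        rw [pvRunsMatch_cons]
        set len1 := pvLenRepeated s i with hl1
        set len2 := pvLenRepeated w j with hl2
        by_cases hce : s.getD i ' ' = w.getD j ' '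
        · rw [if_pos hce]
          by_cases hcond : (len1 < 3 ∧ len1 ≠ len2) ∨ (3 ≤ len1 ∧ len1 < len2)
          · rw [if_pos hcond]
            have hok : pvRunOk ((s.getD i ' ', len1), (w.getD j ' ', len2)) = false := by
              unfold pvRunOk
              simp only [hce, beq_self_eq_true, Bool.true_and]
              rcases hcond with ⟨h3, hne⟩ | ⟨h3, hlt⟩
              · simp [h3, hne]
              · simp [h3, hlt]
            rw [hok]
            simp
          · rw [if_neg hcond]
            have hok : pvRunOk ((s.getD i ' ', len1), (w.getD j ' ', len2)) = true := by
              unfold pvRunOk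
              simp only [hce, beq_self_eq_true, Bool.true_and]
              push_neg at hcond
              by_cases h3 : len1 < 3
              · have := hcond.1 h3
                simp [h3, this]
              · have h3' : 3 ≤ len1 := by omega
                have := hcond.2 h3'
                simp [h3]
                omega
            rw [hok, if_pos rfl]
            have hp1 := pvLenRepeated_pos s i hb.1
            have hle1 := pvLenRepeated_le s i
            have hle2 := pvLenRepeated_le w j
            exact ih (i + len1) (j + len2) (by omega) (by omega) (by omega)
        · rw [if_neg hce]
          have hok : pvRunOk ((s.getD i ' ', len1), (w.getD j ' ', len2)) = false := by
            have hb0 : (s.getD i ' ' == w.getD j ' ') = false := beq_eq_false_iff_ne.mpr hce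
            unfold pvRunOk
            simp only [hb0, Bool.false_and]
          rw [hok]
          simp
      · rw [dif_neg hb]
        -- i = s.length (since s.length - i ≤ n+1 is no info; split on which bound fails)
        rcases Nat.lt_or_ge i s.length with hilt | hige
        · -- then j = w.length must fail: j ≥ w.length, so j = w.length
          have hje : j = w.length := by omega
          rw [hje, List.drop_length, pvRleRec_nil]
          have hsd : s.drop i ≠ [] := by
            simp [List.drop_eq_nil_iff]; omega
          have : pvRleRec (s.drop i) ≠ [] := by
            rw [Ne, pvRleRec_nil_iff]; exact hsd
          cases hr : pvRleRec (s.drop i) with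
          | nil => exact absurd hr this
          | cons a t =>
              rw [pvRunsMatch_cons_nil]
              simp
              omega
        · have hie : i = s.length := by omega
          rw [hie, List.drop_length]
          simp only [pvRleRec]
          rw [pvRunsMatch_nil_left]
          by_cases hje : j = w.length
          · rw [hje, List.drop_length]; simp [pvRleRec, hie]
          · have hwd : w.drop j ≠ [] := by
              simp [List.drop_eq_nil_iff]; omega
            have : pvRleRec (w.drop j) ≠ [] := by
              rw [Ne, pvRleRec_nil_iff]; exact hwd
            cases hr : pvRleRec (w.drop j) with
            | nil => exact absurd hr this
            | cons a t => simp [hie, hje]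

-- ===== VERDICT (by name: the statement is the Claim_ definition above) =====
theorem flag_word_spec : Claim_equal_flag_word := by
  intro s w _
  unfold Spec_flag_word flag_word flag_word_alt
  by_cases he : s.toList.isEmpty || w.toList.isEmpty
  · rw [if_pos he, if_pos he]
  · rw [if_neg he, if_neg he]
    rw [pvRLE_eq_rec, pvRLE_eq_rec]
    have := pvMain s.toList w.toList s.toList.length 0 0 (by omega) (by omega) (by omega)
    simpa using this
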